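-- pv_equiv track=rewrite | github.com/0xStryK3R/Scaler-DSA-Revision | python/Day-45/CW_4.py | solve
-- ===== SOURCE A (Python) =====
-- def solve(A, B):
--     B = A + "$" + B + B[:-1]
--     N = len(B)
--     Z = [0] * N
--     Z[0] = N
--     L = R = 0
--     ans = 0
--
--     for i in range(1, N):
--         if i > R:
--             L = R = i
--             while R < N and B[R] == B[R - L]:
--                 R += 1
--             Z[i] = R - L
--             R -= 1
--         else:
--             j = i - L
--             if Z[j] < R - i + 1:
--                 Z[i] = Z[j]
--             else:
--                 L = i
--                 while R < N and B[R] == B[R - L]: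
--                     R += 1
--                 Z[i] = R - L
--                 R -= 1
--         if Z[i] == len(A):
--             ans += 1
--     return ans
-- ===== SOURCE B (Python) =====
-- def solve(A, B):
--     T = A + "$" + B + B[:-1]
--     m = len(A)
--     return sum(1 for i in range(1, len(T)) if T[i:i+m] == A and T[i+m:i+m+1] != "$")
-- ===== Notes on version B (the rewrite author's own statement) =====
-- stated objective: simpler
-- what changed: Replaces the Z-algorithm (Z-array with L/R z-box maintenance over A+'$'+B+B[:-1]) by a one-line direct scan that counts the positions i >= 1 of the same concatenated string whose length-len(A) slice equals A and is not immediately followed by '$' (exactly the positions where Z[i] == len(A)).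
import Mathlib
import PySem

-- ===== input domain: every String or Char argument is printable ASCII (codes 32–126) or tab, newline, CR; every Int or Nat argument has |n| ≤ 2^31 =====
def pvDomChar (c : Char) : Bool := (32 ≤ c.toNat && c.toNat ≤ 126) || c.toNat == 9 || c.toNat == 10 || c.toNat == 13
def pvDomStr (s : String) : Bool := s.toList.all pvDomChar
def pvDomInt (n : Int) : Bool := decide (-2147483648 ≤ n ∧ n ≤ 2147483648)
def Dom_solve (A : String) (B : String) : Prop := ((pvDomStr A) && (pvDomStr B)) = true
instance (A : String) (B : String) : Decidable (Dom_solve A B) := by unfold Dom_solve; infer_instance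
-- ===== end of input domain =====

-- B replaces A's Z-algorithm by a direct per-position slice comparison over the same
-- sentinel string; simpler, not claimed faster.

-- ===== PORT A =====
-- the inner `while R < N and B[R] == B[R - L]: R += 1` loops (both in A have this shape); returns final R
def solveWhile (l : List Char) (L R : Nat) : Nat :=
  if h : R < l.length ∧ l.getD R ' ' = l.getD (R - L) ' ' then
    solveWhile l L (R + 1)
  else R
termination_by l.length - R
decreasing_by omega

-- one iteration of `for i in range(1, N)`; state (Z, L, R, ans)
def solveStep (l : List Char) (m : Nat) (st : List Nat × Nat × Nat × Int) (i : Nat) :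
    List Nat × Nat × Nat × Int :=
  let Z := st.1
  let L := st.2.1
  let R := st.2.2.1
  let ans := st.2.2.2
  let t :=
    if i > R then
      let R2 := solveWhile l i i
      (Z.set i (R2 - i), i, R2 - 1)
    else
      let j := i - L
      if Z.getD j 0 < R - i + 1 then
        (Z.set i (Z.getD j 0), L, R)
      else
        let R2 := solveWhile l i R
        (Z.set i (R2 - i), i, R2 - 1)
  (t.1, t.2.1, t.2.2, if t.1.getD i 0 = m then ans + 1 else ans)

def solve (A : String) (B : String) : Int :=
  let l : List Char :=
    ((A.toList ++ ['$']) ++ B.toList) ++ PySem.Chars.slice B.toList none (some (-1))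
  let N := l.length
  let Z : List Nat := (List.replicate N 0).set 0 N
  let st := (List.range' 1 (N - 1)).foldl (solveStep l A.toList.length) (Z, 0, 0, (0 : Int))
  st.2.2.2

-- ===== PORT B =====
def solve_alt (A : String) (B : String) : Int :=
  let T : List Char :=
    ((A.toList ++ ['$']) ++ B.toList) ++ PySem.Chars.slice B.toList none (some (-1))
  let m := A.toList.length
  (((List.range' 1 (T.length - 1)).countP (fun (i : Nat) =>
      decide (PySem.List.slice T (some (i : Int)) (some ((i : Int) + (m : Int))) = A.toList ∧
        PySem.List.slice T (some ((i : Int) + (m : Int))) (some ((i : Int) + (m : Int) + 1))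
          ≠ ['$']))) : Int)

-- ===== PRECONDITION & SPEC =====
def Spec_solve (A : String) (B : String) (out : Int) : Prop := out = solve_alt A B
instance (A : String) (B : String) (out : Int) : Decidable (Spec_solve A B out) := by unfold Spec_solve; infer_instance

-- ===== CLAIM (what is proved, stated in full; the proofs are below) =====
def Claim_equal_solve : Prop := ∀ (A : String) (B : String), Dom_solve A B → Spec_solve A B (solve A B)

-- ===== LEMMAS AND PROOFS =====

-- longest-common-prefix length: the value the Z-array holds (Z[i] = lcp l (l.drop i))
def lcp : List Char → List Char → Nat
  | a :: s, b :: t => if a = b then lcp s t + 1 else 0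
  | _, _ => 0

lemma lcp_self (s : List Char) : lcp s s = s.length := by
  induction s with
  | nil => rfl
  | cons a s ih => simp [lcp, ih]

lemma lcp_le_right (s t : List Char) : lcp s t ≤ t.length := by
  induction s generalizing t with
  | nil => cases t <;> simp [lcp]
  | cons a s ih =>
    cases t with
    | nil => simp [lcp]
    | cons b t =>
      by_cases h : a = b <;> simp [lcp, h]
      exact ih t

lemma lcp_eq_iff (s t : List Char) (k : Nat) :
    lcp s t = k ↔
      ((∀ j, j < k → s[j]? = t[j]? ∧ (s[j]?).isSome) ∧ (s[k]? ≠ t[k]? ∨ s[k]? = none)) := by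
  induction s generalizing t k with
  | nil =>
    cases k with
    | zero => simp [lcp]
    | succ k' =>
      constructor
      · intro h; simp [lcp] at h
      · rintro ⟨h1, h2⟩
        have := (h1 0 (by omega)).2
        simp at this
  | cons a s ih =>
    cases t with
    | nil =>
      cases k with
      | zero => simp [lcp]
      | succ k' =>
        simp [lcp]
        intro h
        have := (h 0 (by omega)).1
        simp at this
    | cons b t =>
      by_cases hab : a = b
      · subst hab
        cases k with
        | zero => simp [lcp]
        | succ k' =>
          rw [show lcp (a::s) (a::t) = lcp s t + 1 by simp [lcp]]
          constructor
          · rintro h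
            have h' := (ih t k').1 (by omega)
            refine ⟨?_, ?_⟩
            · intro j hj
              cases j with
              | zero => simp
              | succ j' => simpa using h'.1 j' (by omega)
            · simpa using h'.2
          · rintro ⟨h1, h2⟩
            have : lcp s t = k' := (ih t k').2 ⟨fun j hj => by simpa using h1 (j+1) (by omega), by simpa using h2⟩
            omega
      · rw [show lcp (a::s) (b::t) = 0 by simp [lcp, hab]]
        cases k with
        | zero => simp [hab]
        | succ k' =>
          constructor
          · intro h; omega
          · rintro ⟨h1, h2⟩
            have := (h1 0 (by omega)).1
            simp at this
            exact absurd this hab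

lemma zf_eq_iff (l : List Char) (i k : Nat) :
    lcp l (l.drop i) = k ↔
      ((∀ j, j < k → l[j]? = l[i + j]? ∧ (l[j]?).isSome) ∧ (l[k]? ≠ l[i + k]? ∨ l[k]? = none)) := by
  have h := lcp_eq_iff l (l.drop i) k
  simpa [List.getElem?_drop] using h

lemma solveWhile_spec (l : List Char) (L R : Nat) :
    L ≤ R → R ≤ l.length → (∀ t, t < R - L → l[t]? = l[L + t]?) →
    solveWhile l L R = L + lcp l (l.drop L) := by
  induction R using solveWhile.induct l L with
  | case1 R h ih =>
    intro hLR hRn hpre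
    rw [solveWhile, dif_pos h]
    apply ih (by omega) (by omega)
    intro t ht
    by_cases htR : t < R - L
    · exact hpre t htR
    · have ht' : t = R - L := by omega
      subst ht'
      have hR : R < l.length := h.1
      have hRL : R - L < l.length := by omega
      have hg := h.2
      rw [List.getD_eq_getElem?_getD, List.getD_eq_getElem?_getD,
        List.getElem?_eq_getElem hR, List.getElem?_eq_getElem hRL] at hg
      simp at hg
      rw [List.getElem?_eq_getElem hRL, show L + (R - L) = R by omega,
        List.getElem?_eq_getElem hR, hg]
  | case2 R h =>
    intro hLR hRn hpre
    rw [solveWhile, dif_neg h]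
    have : lcp l (l.drop L) = R - L := by
      rw [zf_eq_iff]
      constructor
      · intro j hj
        refine ⟨hpre j hj, ?_⟩
        have : j < l.length := by omega
        simp [List.getElem?_eq_getElem this]
      · rw [show L + (R - L) = R by omega]
        by_cases hR : R < l.length
        · left
          have hRL : R - L < l.length := by omega
          have hne : l.getD R ' ' ≠ l.getD (R - L) ' ' := fun hc => h ⟨hR, hc⟩
          rw [List.getD_eq_getElem?_getD, List.getD_eq_getElem?_getD,
            List.getElem?_eq_getElem hR, List.getElem?_eq_getElem hRL] at hne
          simp at hne
          rw [List.getElem?_eq_getElem hR, List.getElem?_eq_getElem hRL]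
          simp
          intro hc; exact hne hc.symm
        · have hRn' : R = l.length := by omega
          have hnone : l[R]? = none := by
            rw [List.getElem?_eq_none_iff]; omega
          by_cases hRL : R - L < l.length
          · left; rw [hnone, List.getElem?_eq_getElem hRL]; simp
          · right; rw [List.getElem?_eq_none_iff]; omega
    omega

lemma getD_set_self' (Z : List Nat) (i v : Nat) (h : i < Z.length) : (Z.set i v).getD i 0 = v := by
  simp [List.getD_eq_getElem?_getD, h]

lemma getD_set_ne' (Z : List Nat) (i k v : Nat) (h : k ≠ i) : (Z.set i v).getD k 0 = Z.getD k 0 := by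
  simp [List.getD_eq_getElem?_getD, List.getElem?_set_ne (by omega : i ≠ k)]

lemma box_shift (l : List Char) (L R i : Nat) (hLi : L ≤ i) (hiR : i ≤ R)
    (hbox : ∀ t, t < R + 1 - L → l[t]? = l[L + t]?) :
    ∀ t, t ≤ R - i → l[(i - L) + t]? = l[i + t]? := by
  intro t ht
  have h := hbox ((i - L) + t) (by omega)
  rw [show L + ((i - L) + t) = i + t by omega] at h
  exact h

lemma copy_case (l : List Char) (L R i : Nat) (hLi : L ≤ i)
    (hiR : i ≤ R)
    (hbox : ∀ t, t < R + 1 - L → l[t]? = l[L + t]?)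
    (hlt : lcp l (l.drop (i - L)) < R - i + 1) :
    lcp l (l.drop i) = lcp l (l.drop (i - L)) := by
  obtain ⟨h1, h2⟩ := (zf_eq_iff l (i - L) (lcp l (l.drop (i - L)))).1 rfl
  have hshift := box_shift l L R i hLi hiR hbox
  rw [zf_eq_iff]
  constructor
  · intro s hs
    have h1s := h1 s hs
    refine ⟨?_, h1s.2⟩
    rw [h1s.1]
    exact hshift s (by omega)
  · have hs := hshift (lcp l (l.drop (i - L))) (by omega)
    rcases h2 with h2 | h2
    · left; rw [← hs]; exact h2
    · right; exact h2

def ZInv (l : List Char) (p : Nat) (Z : List Nat) (L R : Nat) : Prop :=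
  Z.length = l.length ∧
  (∀ k, k < p → Z.getD k 0 = lcp l (l.drop k)) ∧
  L < p ∧ R + 1 ≤ l.length ∧ (1 ≤ L ∨ R = 0) ∧
  (∀ t, t < R + 1 - L → l[t]? = l[L + t]?)

lemma step_inv (l : List Char) (m : Nat) (Z : List Nat) (L R : Nat) (ans : Int) (i : Nat)
    (h1 : 1 ≤ i) (hi : i < l.length) (hInv : ZInv l i Z L R) :
    ZInv l (i + 1) (solveStep l m (Z, L, R, ans) i).1 (solveStep l m (Z, L, R, ans) i).2.1
        (solveStep l m (Z, L, R, ans) i).2.2.1 ∧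
      (solveStep l m (Z, L, R, ans) i).2.2.2
        = ans + (if lcp l (l.drop i) = m then 1 else 0) := by
  obtain ⟨hZlen, hZval, hLp, hR1, hL0, hbox⟩ := hInv
  have hzle : lcp l (l.drop i) ≤ l.length - i := by
    have := lcp_le_right l (l.drop i)
    simpa using this
  by_cases hiR : i > R
  · -- fresh box
    have hw : solveWhile l i i = i + lcp l (l.drop i) :=
      solveWhile_spec l i i (le_refl i) (le_of_lt hi) (by intro t ht; omega)
    simp only [solveStep, hiR, if_pos, hw]
    rw [show i + lcp l (l.drop i) - i = lcp l (l.drop i) by omega]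
    have hset := getD_set_self' Z i (lcp l (l.drop i)) (by omega)
    refine ⟨⟨by simpa using hZlen, ?_, by omega, by omega, by omega, ?_⟩, ?_⟩
    · intro k hk
      by_cases hki : k = i
      · subst hki; exact hset
      · rw [getD_set_ne' Z i k _ hki]; exact hZval k (by omega)
    · intro t ht
      have ht' : t < lcp l (l.drop i) := by omega
      exact ((zf_eq_iff l i (lcp l (l.drop i))).1 rfl).1 t ht' |>.1
    · rw [hset]
      split_ifs <;> simp
  · -- i ≤ R: L ≥ 1 and L ≤ i
    rw [not_lt] at hiR
    have hL1 : 1 ≤ L := hL0.resolve_right (by omega)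
    have hLi : L ≤ i := by omega
    have hjlt : i - L < i := by omega
    have hZj : Z.getD (i - L) 0 = lcp l (l.drop (i - L)) := hZval (i - L) hjlt
    by_cases hcopy : Z.getD (i - L) 0 < R - i + 1
    · have hz : lcp l (l.drop i) = Z.getD (i - L) 0 := by
        rw [hZj]
        exact copy_case l L R i hLi hiR hbox (by omega)
      simp only [solveStep, gt_iff_lt, if_neg (by omega : ¬ R < i), if_pos hcopy]
      have hset := getD_set_self' Z i (Z.getD (i - L) 0) (by omega)
      refine ⟨⟨by simpa using hZlen, ?_, by omega, hR1, Or.inl hL1, hbox⟩, ?_⟩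
      · intro k hk
        by_cases hki : k = i
        · subst hki; rw [hset, hz]
        · rw [getD_set_ne' Z i k _ hki]; exact hZval k (by omega)
      · rw [hset, hz]
        split_ifs <;> simp
    · -- extend from R with L := i
      have hge : R - i + 1 ≤ lcp l (l.drop (i - L)) := by omega
      have hshift := box_shift l L R i hLi hiR hbox
      have hj1 := ((zf_eq_iff l (i - L) (lcp l (l.drop (i - L)))).1 rfl).1
      have hpre : ∀ t, t < R - i → l[t]? = l[i + t]? := by
        intro t ht
        have := (hj1 t (by omega)).1
        rw [this]
        exact hshift t (by omega)
      have hw : solveWhile l i R = i + lcp l (l.drop i) :=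
        solveWhile_spec l i R hiR (by omega) hpre
      simp only [solveStep, gt_iff_lt, if_neg (by omega : ¬ R < i), if_neg hcopy, hw]
      rw [show i + lcp l (l.drop i) - i = lcp l (l.drop i) by omega]
      have hset := getD_set_self' Z i (lcp l (l.drop i)) (by omega)
      refine ⟨⟨by simpa using hZlen, ?_, by omega, by omega, by omega, ?_⟩, ?_⟩
      · intro k hk
        by_cases hki : k = i
        · subst hki; exact hset
        · rw [getD_set_ne' Z i k _ hki]; exact hZval k (by omega)
      · intro t ht
        have ht' : t < lcp l (l.drop i) := by omega
        exact ((zf_eq_iff l i (lcp l (l.drop i))).1 rfl).1 t ht' |>.1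
      · rw [hset]
        split_ifs <;> simp

lemma take_one_eq_singleton_iff (s : List Char) (c : Char) :
    s.take 1 = [c] ↔ s[0]? = some c := by
  cases s <;> simp

lemma loop_spec (l : List Char) (m : Nat) :
    ∀ (cnt p : Nat) (st : List Nat × Nat × Nat × Int),
      1 ≤ p → p + cnt ≤ l.length → ZInv l p st.1 st.2.1 st.2.2.1 →
      ((List.range' p cnt).foldl (solveStep l m) st).2.2.2
        = st.2.2.2 + (((List.range' p cnt).countP (fun i => decide (lcp l (l.drop i) = m))) : Int) := by
  intro cnt
  induction cnt with
  | zero => intro p st _ _ _; simp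
  | succ c ih =>
    intro p st hp hpc hInv
    rw [List.range'_succ, List.foldl_cons, List.countP_cons]
    obtain ⟨hInv', hans⟩ := step_inv l m st.1 st.2.1 st.2.2.1 st.2.2.2 p hp (by omega) hInv
    rw [ih (p + 1) (solveStep l m st p) (by omega) (by omega) hInv', hans]
    simp only [decide_eq_true_eq]
    split_ifs with h
    · push_cast; ring
    · push_cast; ring

lemma match_iff (aL rest : List Char) (i : Nat) :
    lcp (aL ++ '$' :: rest) ((aL ++ '$' :: rest).drop i) = aL.length ↔
      (((aL ++ '$' :: rest).drop i).take aL.length = aL ∧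
        ((aL ++ '$' :: rest).drop (i + aL.length)).take 1 ≠ ['$']) := by
  set l := aL ++ '$' :: rest with hl
  set m := aL.length with hm
  have hml : l[m]? = some '$' := by rw [hl, hm]; simp
  rw [zf_eq_iff]
  constructor
  · rintro ⟨h1, h2⟩
    have h2' : l[i + m]? ≠ some '$' := by
      rcases h2 with h2 | h2
      · rw [hml] at h2; exact fun hc => h2 hc.symm
      · rw [hml] at h2; exact absurd h2 (by simp)
    refine ⟨?_, ?_⟩
    · apply List.ext_getElem?
      intro j
      rw [List.getElem?_take]
      by_cases hj : j < m
      · rw [if_pos hj, List.getElem?_drop]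
        have h1j := (h1 j hj).1
        rw [← h1j, hl]
        exact List.getElem?_append_left (l₂ := '$' :: rest) (by omega)
      · rw [if_neg hj]
        symm
        rw [List.getElem?_eq_none_iff]
        omega
    · intro hc
      rw [take_one_eq_singleton_iff, List.getElem?_drop, Nat.add_zero] at hc
      exact h2' hc
  · rintro ⟨ht, hne⟩
    refine ⟨?_, ?_⟩
    · intro j hj
      have hget := congrArg (fun s : List Char => s[j]?) ht
      simp only [List.getElem?_take, if_pos hj, List.getElem?_drop] at hget
      have haLj : aL[j]? = some aL[j] := List.getElem?_eq_getElem hj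
      have hlj : l[j]? = aL[j]? := by rw [hl]; exact List.getElem?_append_left (by omega)
      refine ⟨by rw [hlj, ← hget], by rw [hlj, haLj]; simp⟩
    · left
      rw [hml]
      intro hc
      apply hne
      rw [take_one_eq_singleton_iff, List.getElem?_drop, Nat.add_zero]
      exact hc.symm

theorem main_count (aL rest : List Char) (l : List Char) (hl : l = aL ++ '$' :: rest) :
    ((List.range' 1 (l.length - 1)).foldl (solveStep l aL.length)
        ((List.replicate l.length 0).set 0 l.length, 0, 0, (0 : Int))).2.2.2
      = (((List.range' 1 (l.length - 1)).countP (fun i =>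
          decide ((l.drop i).take aL.length = aL ∧ (l.drop (i + aL.length)).take 1 ≠ ['$']))) : Int) := by
  have hn : 1 ≤ l.length := by subst hl; simp; omega
  have hInv0 : ZInv l 1 ((List.replicate l.length 0).set 0 l.length) 0 0 := by
    refine ⟨by simp, ?_, by omega, by omega, Or.inr rfl, ?_⟩
    · intro k hk
      have hk0 : k = 0 := by omega
      subst hk0
      rw [getD_set_self' _ _ _ (by simpa using hn), List.drop_zero, lcp_self]
    · intro t ht
      have ht0 : t = 0 := by omega
      subst ht0
      simp
  rw [loop_spec l aL.length (l.length - 1) 1 _ le_rfl (by omega) hInv0]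
  show (0 : Int) + _ = _
  rw [Int.zero_add]
  congr 1
  apply List.countP_congr
  intro a _
  subst hl
  simp only [decide_eq_true_eq]
  exact match_iff aL rest a

theorem solve_eq (A B : String) : solve A B = solve_alt A B := by
  simp only [solve, solve_alt]
  have hl : ((A.toList ++ ['$']) ++ B.toList) ++ PySem.Chars.slice B.toList none (some (-1))
      = A.toList ++ '$' :: (B.toList ++ PySem.Chars.slice B.toList none (some (-1))) := by
    simp
  rw [hl]
  rw [main_count A.toList (B.toList ++ PySem.Chars.slice B.toList none (some (-1))) _ rfl]
  congr 1
  apply List.countP_congr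
  intro a _
  have e1 : (a : Int) + (A.toList.length : Int) = ((a + A.toList.length : Nat) : Int) := by
    push_cast; ring
  have e2 : ((a + A.toList.length : Nat) : Int) + 1 = ((a + A.toList.length + 1 : Nat) : Int) := by
    push_cast; ring
  have e3 : a + A.toList.length + 1 - (a + A.toList.length) = 1 := by omega
  simp only [e1, e2, PySem.List.slice_natCast, Nat.add_sub_cancel_left, e3]

-- ===== VERDICT (by name: the statement is the Claim_ definition above) =====
theorem solve_spec : Claim_equal_solve := by
  intro A B _
  unfold Spec_solve
  exact solve_eq A B
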